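-- pv_equiv track=rewrite | github.com/pfeinsper/drone-swarm-search-algorithms | src/traditional_search_4_agent.py | traditional_search_4_agent
-- ===== SOURCE A (Python) =====
-- def traditional_search_4_agent(obs, agents, opt, passos):
--
--     actions = {}
--
--     for agent in agents:
--         if agent == "drone0":
--             start_position = (opt['drones_positions'][0][0], opt['drones_positions'][0][1])
--
--             if (obs[agent][0][0] - start_position[0]) % 2 == 0:
--                 if passos == 0:
--                     actions[agent] = 0
--                 else:
--                     actions[agent] = 3
--             elif (obs[agent][0][0] - start_position[0]) % 2 != 0:
--                 if passos == 0:
--                     actions[agent] = 0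
--                 else:
--                     actions[agent] = 2
--         elif agent == "drone1":
--             start_position = (opt['drones_positions'][1][0], opt['drones_positions'][1][1])
--
--             if (obs[agent][0][0] - start_position[0]) % 2 == 0:
--                 if passos == 0:
--                     actions[agent] = 1
--                 else:
--                     actions[agent] = 3
--             elif (obs[agent][0][0] - start_position[0]) % 2 != 0:
--                 if passos == 0:
--                     actions[agent] = 1
--                 else:
--                     actions[agent] = 2
--         elif agent == "drone2":
--             start_position = (opt['drones_positions'][2][0], opt['drones_positions'][2][1])
--
--             if (obs[agent][0][0] - start_position[0]) % 2 == 0: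
--                 if passos == 0:
--                     actions[agent] = 0
--                 else:
--                     actions[agent] = 2
--             elif (obs[agent][0][0] - start_position[0]) % 2 != 0:
--                 if passos == 0:
--                     actions[agent] = 0
--                 else:
--                     actions[agent] = 3
--         elif agent == "drone3":
--             start_position = (opt['drones_positions'][3][0], opt['drones_positions'][3][1])
--
--             if (obs[agent][0][0] - start_position[0]) % 2 == 0:
--                 if passos == 0:
--                     actions[agent] = 1
--                 else:
--                     actions[agent] = 2
--             elif (obs[agent][0][0] - start_position[0]) % 2 != 0:
--                 if passos == 0:
--                     actions[agent] = 1
--                 else: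
--                     actions[agent] = 3
--
--     return actions
-- ===== SOURCE B (Python) =====
-- _DRONES = ("drone0", "drone1", "drone2", "drone3")
--
--
-- def _action(obs, opt, passos, i, name):
--     if passos == 0:
--         return i % 2
--     p = (obs[name][0][0] - opt["drones_positions"][i][0]) % 2
--     return 2 + (p + i // 2 + 1) % 2
--
--
-- def traditional_search_4_agent(obs, agents, opt, passos):
--     # Stage 1: walk the fixed drone roster once, computing each present
--     # drone's action into a lookup table.
--     present = set(agents)
--     table = {}
--     for i, name in enumerate(_DRONES):
--         if name in present:
--             table[name] = _action(obs, opt, passos, i, name)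
--     # Stage 2: emit actions in the agents' order via table lookups.
--     return {a: table[a] for a in agents if a in table}
-- ===== Notes on version B (the rewrite author's own statement) =====
-- stated objective: simpler
-- what changed: Replaces A's one loop with four copy-pasted if-elif branches by two staged passes: first a walk over the fixed drone roster computing each present drone's action once (closed form) into a name-to-action table, then a pass over agents emitting the table entries in order.
import Mathlib
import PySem

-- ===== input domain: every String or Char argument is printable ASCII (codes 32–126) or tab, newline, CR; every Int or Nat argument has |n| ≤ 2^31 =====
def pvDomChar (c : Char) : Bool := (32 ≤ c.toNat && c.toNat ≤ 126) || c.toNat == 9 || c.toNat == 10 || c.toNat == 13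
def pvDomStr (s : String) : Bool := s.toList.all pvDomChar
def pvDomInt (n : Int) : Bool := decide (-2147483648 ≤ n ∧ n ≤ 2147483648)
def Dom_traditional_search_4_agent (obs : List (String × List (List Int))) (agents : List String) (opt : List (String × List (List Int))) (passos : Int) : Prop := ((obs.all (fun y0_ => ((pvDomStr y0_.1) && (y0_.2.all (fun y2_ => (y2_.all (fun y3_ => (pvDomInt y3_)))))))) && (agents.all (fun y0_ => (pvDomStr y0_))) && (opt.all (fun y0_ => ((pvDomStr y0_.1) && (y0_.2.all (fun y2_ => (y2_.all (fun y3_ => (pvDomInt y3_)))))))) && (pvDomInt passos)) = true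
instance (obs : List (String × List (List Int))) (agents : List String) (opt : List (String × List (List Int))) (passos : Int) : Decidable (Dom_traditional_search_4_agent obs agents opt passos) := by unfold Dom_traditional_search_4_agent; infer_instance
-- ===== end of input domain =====

-- B replaces A's single loop with its four copy-pasted if-elif branches by two staged
-- passes: one over the fixed drone roster building a name→action lookup table (each
-- present drone's action computed once, by a closed-form formula), then one over the
-- agents emitting the table entries (objective: simpler).

-- ===== PORT A =====
-- One iteration of A's for-loop: the four-way if-elif chain, transliterated branch by branch.
-- Where Python would raise (missing key / short list) the getD defaults are used; those
-- inputs are excluded by Pre_ below.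
def pvAStep (obs : List (String × List (List Int))) (opt : List (String × List (List Int))) (passos : Int) (actions : PySem.Dict String Int) (agent : String) : PySem.Dict String Int :=
  if agent = "drone0" then
    let dp := (PySem.Dict.get? (PySem.Dict.mk opt) "drones_positions").getD []
    let start_position := (PySem.List.pyGetD (PySem.List.pyGetD dp 0 []) 0 0, PySem.List.pyGetD (PySem.List.pyGetD dp 0 []) 1 0)
    let o := PySem.List.pyGetD (PySem.List.pyGetD ((PySem.Dict.get? (PySem.Dict.mk obs) agent).getD []) 0 []) 0 0
    if PySem.Int.mod (o - start_position.1) 2 = 0 then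
      (if passos = 0 then actions.insert agent 0 else actions.insert agent 3)
    else if ¬ PySem.Int.mod (o - start_position.1) 2 = 0 then
      (if passos = 0 then actions.insert agent 0 else actions.insert agent 2)
    else actions
  else if agent = "drone1" then
    let dp := (PySem.Dict.get? (PySem.Dict.mk opt) "drones_positions").getD []
    let start_position := (PySem.List.pyGetD (PySem.List.pyGetD dp 1 []) 0 0, PySem.List.pyGetD (PySem.List.pyGetD dp 1 []) 1 0)
    let o := PySem.List.pyGetD (PySem.List.pyGetD ((PySem.Dict.get? (PySem.Dict.mk obs) agent).getD []) 0 []) 0 0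
    if PySem.Int.mod (o - start_position.1) 2 = 0 then
      (if passos = 0 then actions.insert agent 1 else actions.insert agent 3)
    else if ¬ PySem.Int.mod (o - start_position.1) 2 = 0 then
      (if passos = 0 then actions.insert agent 1 else actions.insert agent 2)
    else actions
  else if agent = "drone2" then
    let dp := (PySem.Dict.get? (PySem.Dict.mk opt) "drones_positions").getD []
    let start_position := (PySem.List.pyGetD (PySem.List.pyGetD dp 2 []) 0 0, PySem.List.pyGetD (PySem.List.pyGetD dp 2 []) 1 0)
    let o := PySem.List.pyGetD (PySem.List.pyGetD ((PySem.Dict.get? (PySem.Dict.mk obs) agent).getD []) 0 []) 0 0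
    if PySem.Int.mod (o - start_position.1) 2 = 0 then
      (if passos = 0 then actions.insert agent 0 else actions.insert agent 2)
    else if ¬ PySem.Int.mod (o - start_position.1) 2 = 0 then
      (if passos = 0 then actions.insert agent 0 else actions.insert agent 3)
    else actions
  else if agent = "drone3" then
    let dp := (PySem.Dict.get? (PySem.Dict.mk opt) "drones_positions").getD []
    let start_position := (PySem.List.pyGetD (PySem.List.pyGetD dp 3 []) 0 0, PySem.List.pyGetD (PySem.List.pyGetD dp 3 []) 1 0)
    let o := PySem.List.pyGetD (PySem.List.pyGetD ((PySem.Dict.get? (PySem.Dict.mk obs) agent).getD []) 0 []) 0 0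
    if PySem.Int.mod (o - start_position.1) 2 = 0 then
      (if passos = 0 then actions.insert agent 1 else actions.insert agent 2)
    else if ¬ PySem.Int.mod (o - start_position.1) 2 = 0 then
      (if passos = 0 then actions.insert agent 1 else actions.insert agent 3)
    else actions
  else actions

def traditional_search_4_agent (obs : List (String × List (List Int))) (agents : List String) (opt : List (String × List (List Int))) (passos : Int) : List (String × Int) :=
  (agents.foldl (fun actions agent => pvAStep obs opt passos actions agent) PySem.Dict.empty).items

-- ===== PORT B =====
-- the module constant _DRONES, enumerated: [(i, name), …]
def pvDrones : List (Int × String) := [(0, "drone0"), (1, "drone1"), (2, "drone2"), (3, "drone3")]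

-- Source B's helper _action
def pvAction (obs : List (String × List (List Int))) (opt : List (String × List (List Int))) (passos : Int) (i : Int) (name : String) : Int :=
  if passos = 0 then PySem.Int.mod i 2
  else
    let p := PySem.Int.mod (PySem.List.pyGetD (PySem.List.pyGetD ((PySem.Dict.get? (PySem.Dict.mk obs) name).getD []) 0 []) 0 0 - PySem.List.pyGetD (PySem.List.pyGetD ((PySem.Dict.get? (PySem.Dict.mk opt) "drones_positions").getD []) i []) 0 0) 2
    2 + PySem.Int.mod (p + PySem.Int.floordiv i 2 + 1) 2

-- stage 1: the roster loop building the lookup table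
def pvTable (obs : List (String × List (List Int))) (opt : List (String × List (List Int))) (passos : Int) (present : PySem.Set String) : PySem.Dict String Int :=
  pvDrones.foldl
    (fun table en =>
      if PySem.Set.contains present en.2 then table.insert en.2 (pvAction obs opt passos en.1 en.2)
      else table)
    PySem.Dict.empty

def traditional_search_4_agent_alt (obs : List (String × List (List Int))) (agents : List String) (opt : List (String × List (List Int))) (passos : Int) : List (String × Int) :=
  let present := PySem.Set.ofList agents
  let table := pvTable obs opt passos present
  -- stage 2: the dict comprehension {a: table[a] for a in agents if a in table}
  (agents.foldl
    (fun acc a =>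
      match table.get? a with
      | some v => acc.insert a v
      | none => acc)
    PySem.Dict.empty).items

-- ===== PRECONDITION & SPEC =====
-- Pre_ excludes exactly the inputs on which Python A raises: an agent named drone0..3 whose
-- key is missing from obs (KeyError) or whose obs rows / first row are empty (IndexError),
-- or 'drones_positions' missing from opt (KeyError) or its list/rows too short (IndexError).
def pvPreAgent (obs : List (String × List (List Int))) (opt : List (String × List (List Int))) (a : String) (i : Nat) : Bool :=
  (match PySem.Dict.get? (PySem.Dict.mk obs) a with
   | some rows => !rows.isEmpty && !(rows.headD []).isEmpty
   | none => false)
  && (match PySem.Dict.get? (PySem.Dict.mk opt) "drones_positions" with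
      | some dp => decide (i < dp.length) && decide (2 ≤ (dp.getD i []).length)
      | none => false)

def Pre_traditional_search_4_agent (obs : List (String × List (List Int))) (agents : List String) (opt : List (String × List (List Int))) (passos : Int) : Prop :=
  ∀ a ∈ agents,
    (a = "drone0" → pvPreAgent obs opt a 0 = true) ∧
    (a = "drone1" → pvPreAgent obs opt a 1 = true) ∧
    (a = "drone2" → pvPreAgent obs opt a 2 = true) ∧
    (a = "drone3" → pvPreAgent obs opt a 3 = true)

instance (obs : List (String × List (List Int))) (agents : List String) (opt : List (String × List (List Int))) (passos : Int) : Decidable (Pre_traditional_search_4_agent obs agents opt passos) := by unfold Pre_traditional_search_4_agent; infer_instance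

def pvWitness_traditional_search_4_agent : (List (String × List (List Int))) × List String × (List (String × List (List Int))) × Int :=
  ([("drone0", [[0, 0]]), ("drone1", [[1, 2]])], ["drone0", "drone1", "cam"], [("drones_positions", [[0, 0], [2, 0], [0, 1], [1, 1]])], 1)

def Spec_traditional_search_4_agent (obs : List (String × List (List Int))) (agents : List String) (opt : List (String × List (List Int))) (passos : Int) (out : List (String × Int)) : Prop := out = traditional_search_4_agent_alt obs agents opt passos
instance (obs : List (String × List (List Int))) (agents : List String) (opt : List (String × List (List Int))) (passos : Int) (out : List (String × Int)) : Decidable (Spec_traditional_search_4_agent obs agents opt passos out) := by unfold Spec_traditional_search_4_agent; infer_instance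

-- ===== CLAIM (what is proved, stated in full; the proofs are below) =====
def Claim_equal_traditional_search_4_agent : Prop := ∀ (obs : List (String × List (List Int))) (agents : List String) (opt : List (String × List (List Int))) (passos : Int), Dom_traditional_search_4_agent obs agents opt passos → Pre_traditional_search_4_agent obs agents opt passos → Spec_traditional_search_4_agent obs agents opt passos (traditional_search_4_agent obs agents opt passos)

-- ===== LEMMAS AND PROOFS =====

-- What the stage-1 table answers for each possible key (holds for every input).
theorem pvTable_get (obs : List (String × List (List Int))) (opt : List (String × List (List Int))) (passos : Int) (agents : List String) (a : String) :
    (pvTable obs opt passos (PySem.Set.ofList agents)).get? a =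
      if a = "drone0" ∧ a ∈ agents then some (pvAction obs opt passos 0 a)
      else if a = "drone1" ∧ a ∈ agents then some (pvAction obs opt passos 1 a)
      else if a = "drone2" ∧ a ∈ agents then some (pvAction obs opt passos 2 a)
      else if a = "drone3" ∧ a ∈ agents then some (pvAction obs opt passos 3 a)
      else none := by
  simp only [pvTable, pvDrones, List.foldl]
  by_cases h0 : "drone0" ∈ agents <;> by_cases h1 : "drone1" ∈ agents <;>
    by_cases h2 : "drone2" ∈ agents <;> by_cases h3 : "drone3" ∈ agents <;>
      by_cases e0 : a = "drone0" <;> by_cases e1 : a = "drone1" <;>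
        by_cases e2 : a = "drone2" <;> by_cases e3 : a = "drone3" <;>
          simp_all [PySem.Set.mem_ofList,
            PySem.Dict.get?_insert, PySem.Dict.get?_empty]

-- On agents actually looped over, one stage-2 step of B equals one step of A's loop.
theorem pvStep_eq (obs : List (String × List (List Int))) (opt : List (String × List (List Int))) (passos : Int) (agents : List String) (a : String) (ha : a ∈ agents) (d : PySem.Dict String Int) :
    (match (pvTable obs opt passos (PySem.Set.ofList agents)).get? a with
     | some v => d.insert a v
     | none => d) = pvAStep obs opt passos d a := by
  have hmod : ∀ x : Int, PySem.Int.mod x 2 = 0 ∨ PySem.Int.mod x 2 = 1 := by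
    intro x
    have h1 := PySem.Int.mod_nonneg x (b := 2) (by norm_num)
    have h2 := PySem.Int.mod_lt x (b := 2) (by norm_num)
    omega
  rw [pvTable_get]
  by_cases e0 : a = "drone0"
  · subst e0
    rcases hmod (PySem.List.pyGetD (PySem.List.pyGetD ((PySem.Dict.get? (PySem.Dict.mk obs) "drone0").getD []) 0 []) 0 0 - PySem.List.pyGetD (PySem.List.pyGetD ((PySem.Dict.get? (PySem.Dict.mk opt) "drones_positions").getD []) 0 []) 0 0) with hm | hm <;>
      by_cases hp : passos = 0 <;>
      simp only [pvAStep, pvAction, ha, String.reduceEq, and_true, if_true, if_false] <;>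
      rw [hm] <;> norm_num [hp]
  · by_cases e1 : a = "drone1"
    · subst e1
      rcases hmod (PySem.List.pyGetD (PySem.List.pyGetD ((PySem.Dict.get? (PySem.Dict.mk obs) "drone1").getD []) 0 []) 0 0 - PySem.List.pyGetD (PySem.List.pyGetD ((PySem.Dict.get? (PySem.Dict.mk opt) "drones_positions").getD []) 1 []) 0 0) with hm | hm <;>
        by_cases hp : passos = 0 <;>
        simp only [pvAStep, pvAction, ha, String.reduceEq, and_true, if_true, if_false] <;>
        rw [hm] <;> norm_num [hp]
    · by_cases e2 : a = "drone2"
      · subst e2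
        rcases hmod (PySem.List.pyGetD (PySem.List.pyGetD ((PySem.Dict.get? (PySem.Dict.mk obs) "drone2").getD []) 0 []) 0 0 - PySem.List.pyGetD (PySem.List.pyGetD ((PySem.Dict.get? (PySem.Dict.mk opt) "drones_positions").getD []) 2 []) 0 0) with hm | hm <;>
          by_cases hp : passos = 0 <;>
          simp only [pvAStep, pvAction, ha, String.reduceEq, and_true, if_true, if_false] <;>
          rw [hm] <;> norm_num [hp]
      · by_cases e3 : a = "drone3"
        · subst e3
          rcases hmod (PySem.List.pyGetD (PySem.List.pyGetD ((PySem.Dict.get? (PySem.Dict.mk obs) "drone3").getD []) 0 []) 0 0 - PySem.List.pyGetD (PySem.List.pyGetD ((PySem.Dict.get? (PySem.Dict.mk opt) "drones_positions").getD []) 3 []) 0 0) with hm | hm <;>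
            by_cases hp : passos = 0 <;>
            simp only [pvAStep, pvAction, ha, String.reduceEq, and_true, if_true, if_false] <;>
            rw [hm] <;> norm_num [hp]
        · simp only [pvAStep, e0, e1, e2, e3, false_and, if_false]

-- ===== VERDICT (by name: the statement is the Claim_ definition above) =====
theorem traditional_search_4_agent_spec : Claim_equal_traditional_search_4_agent := by
  intro obs agents opt passos _ _
  unfold Spec_traditional_search_4_agent traditional_search_4_agent traditional_search_4_agent_alt
  refine congrArg PySem.Dict.items ?_
  refine Eq.symm (PySem.List.foldl_congr_mem _ _ _ _ ?_)
  exact fun d a ha => pvStep_eq obs opt passos agents a ha d
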